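-- pv_equiv track=rewrite | github.com/AyudaEnPython/Soluciones | ejercicios/generar_mayor_menor_de_un_numero.py | obtener_menor
-- ===== SOURCE A (Python) =====
-- def cantidad_de_digitos(numero: int) -> int:
--     i = 0
--     while numero > 0:
--         numero //= 10
--         i += 1
--     return i
--
-- def obtener_menor(numero: int) -> int:
--     j = cantidad_de_digitos(numero)
--     menor = numero % 10
--     k = 0
--     for i in range(j):
--         actual = numero % 10
--         if actual < menor:
--             menor = actual
--             k = i
--         numero //= 10
--     return menor, k
-- ===== SOURCE B (Python) =====
-- def obtener_menor(numero: int) -> int: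
--     digits = []
--     n = numero
--     while n > 0:
--         digits.append(n % 10)
--         n //= 10
--     menor = numero % 10
--     k = 0
--     if digits:
--         menor = min(digits)
--         k = digits.index(menor)
--     return menor, k
-- ===== Notes on version B (the rewrite author's own statement) =====
-- stated objective: alternative
-- what changed: B first materialises the digit list (least-significant first) in one pass, then obtains the minimum with min() and its position with list.index(), instead of A's single loop that counts digits first and then tracks a running minimum with an index counter.
import Mathlib
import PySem

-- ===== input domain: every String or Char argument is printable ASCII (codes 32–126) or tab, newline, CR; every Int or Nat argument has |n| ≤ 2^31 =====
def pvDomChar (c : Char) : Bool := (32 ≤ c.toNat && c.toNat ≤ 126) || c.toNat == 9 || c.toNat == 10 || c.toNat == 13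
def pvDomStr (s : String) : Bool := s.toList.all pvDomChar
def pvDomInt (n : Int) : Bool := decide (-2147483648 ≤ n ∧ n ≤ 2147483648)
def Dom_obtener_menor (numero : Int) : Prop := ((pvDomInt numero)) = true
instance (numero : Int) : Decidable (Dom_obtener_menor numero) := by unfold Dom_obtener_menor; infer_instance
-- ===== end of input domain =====

-- B materialises the digit list in one pass and then uses min/index, instead of A's running-minimum loop; alternative decomposition, same cost.


-- ===== PORT A =====
-- while numero > 0: numero //= 10; i += 1
def cantidad_loop (numero : Int) (i : Int) : Int :=
  if numero > 0 then cantidad_loop (PySem.Int.floordiv numero 10) (i + 1) else i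
termination_by numero.toNat
decreasing_by
  rw [PySem.Int.floordiv_eq_ediv_of_pos (by omega : (0:Int) < 10)]
  omega

def cantidad_de_digitos (numero : Int) : Int := cantidad_loop numero 0

def obtener_menor (numero : Int) : Int × Int :=
  let j := cantidad_de_digitos numero
  let st := (PySem.List.pyRange 0 j 1).foldl
    (fun (s : Int × Int × Int) (i : Int) =>
      let actual := PySem.Int.mod s.2.2 10
      if actual < s.1 then (actual, i, PySem.Int.floordiv s.2.2 10)
      else (s.1, s.2.1, PySem.Int.floordiv s.2.2 10))
    (PySem.Int.mod numero 10, 0, numero)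
  (st.1, st.2.1)

-- ===== PORT B =====
-- while n > 0: digits.append(n % 10); n //= 10
def digitsOf (n : Int) : List Int :=
  if n > 0 then PySem.Int.mod n 10 :: digitsOf (PySem.Int.floordiv n 10) else []
termination_by n.toNat
decreasing_by
  rw [PySem.Int.floordiv_eq_ediv_of_pos (by omega : (0:Int) < 10)]
  omega

def obtener_menor_alt (numero : Int) : Int × Int :=
  let digits := digitsOf numero
  match digits with
  | [] => (PySem.Int.mod numero 10, 0)
  | _ :: _ =>
      let menor := (PySem.List.min? digits (fun x => x)).getD 0
      let k : Int := ((PySem.List.index? digits menor).getD 0 : Nat)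
      (menor, k)

-- ===== PRECONDITION & SPEC =====
def Spec_obtener_menor (numero : Int) (out : Int × Int) : Prop := out = obtener_menor_alt numero
instance (numero : Int) (out : Int × Int) : Decidable (Spec_obtener_menor numero out) := by unfold Spec_obtener_menor; infer_instance

-- ===== CLAIM (what is proved, stated in full; the proofs are below) =====
def Claim_equal_obtener_menor : Prop := ∀ (numero : Int), Dom_obtener_menor numero → Spec_obtener_menor numero (obtener_menor numero)

-- ===== LEMMAS AND PROOFS =====

-- abstract form of A's tracking loop, over an explicit digit list
def foldMin : List Int → Int → Int → Int → Int × Int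
  | [], m, k, _ => (m, k)
  | d :: t, m, k, i => if d < m then foldMin t d i (i + 1) else foldMin t m k (i + 1)

-- index (as Int) of the first occurrence of x
def idx : List Int → Int → Int
  | [], _ => 0
  | d :: t, x => if d = x then 0 else 1 + idx t x

lemma idx_nonneg (l : List Int) (x : Int) : 0 ≤ idx l x := by
  induction l with
  | nil => simp [idx]
  | cons d t ih => simp only [idx]; split <;> omega

lemma cantidad_loop_eq (n : Int) (i : Int) :
    cantidad_loop n i = i + ((digitsOf n).length : Int) := by
  induction n using digitsOf.induct generalizing i with
  | case1 n h ih =>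
      rw [cantidad_loop, digitsOf, if_pos h, if_pos h, ih]
      simp only [List.length_cons]; push_cast; ring
  | case2 n h =>
      rw [cantidad_loop, digitsOf, if_neg h, if_neg h]; simp

lemma foldMin_spec (t : List Int) (m k i : Int) :
    foldMin t m k i =
      (t.foldl min m, if t.foldl min m < m then i + idx t (t.foldl min m) else k) := by
  induction t generalizing m k i with
  | nil => simp [foldMin]
  | cons d t ih =>
      simp only [foldMin, List.foldl_cons]
      by_cases hd : d < m
      · have hmd : min m d = d := by omega
        rw [if_pos hd, ih, hmd]
        have hle := (PySem.List.foldl_min_le t d).1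
        rcases eq_or_lt_of_le hle with heq | hlt
        · rw [heq]; simp [idx, hd]
        · have hne : ¬ d = t.foldl min d := by omega
          simp only [if_pos hlt, if_pos (hlt.trans hd), idx, if_neg hne, Prod.mk.injEq]
          exact ⟨by trivial, by ring⟩
      · have hmd : min m d = m := by omega
        rw [if_neg hd, ih, hmd]
        by_cases hM : t.foldl min m < m
        · have hne : ¬ d = t.foldl min m := by omega
          simp only [if_pos hM, idx, if_neg hne, Prod.mk.injEq]
          exact ⟨by trivial, by ring⟩
        · simp [hM]

-- A's pyRange fold, on a number whose digit list is digitsOf n, equals foldMin on that list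
lemma loopA_eq (n : Int) (m k i : Int) :
    ∃ nf, (PySem.List.pyRange i (i + ((digitsOf n).length : Int)) 1).foldl
      (fun (s : Int × Int × Int) (j : Int) =>
        let actual := PySem.Int.mod s.2.2 10
        if actual < s.1 then (actual, j, PySem.Int.floordiv s.2.2 10)
        else (s.1, s.2.1, PySem.Int.floordiv s.2.2 10))
      (m, k, n) = ((foldMin (digitsOf n) m k i).1, (foldMin (digitsOf n) m k i).2, nf) := by
  induction n using digitsOf.induct generalizing m k i with
  | case1 n h ih =>
      rw [digitsOf]; simp only [h, if_true]
      have hlen : (0:Int) < ((PySem.Int.mod n 10 :: digitsOf (PySem.Int.floordiv n 10)).length : Int) := by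
        simp
      rw [PySem.List.pyRange_one_cons (by omega)]
      simp only [List.foldl_cons, List.length_cons, foldMin]
      by_cases hd : PySem.Int.mod n 10 < m
      · simp only [hd, if_pos]
        obtain ⟨nf, hnf⟩ := ih (PySem.Int.mod n 10) i (i + 1)
        refine ⟨nf, ?_⟩
        rw [← hnf]; congr 2; push_cast; ring
      · simp only [hd, ite_false]
        obtain ⟨nf, hnf⟩ := ih m k (i + 1)
        refine ⟨nf, ?_⟩
        rw [← hnf]; congr 2; push_cast; ring
  | case2 n h =>
      rw [digitsOf]; simp only [h, ite_false]
      refine ⟨n, ?_⟩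
      rw [PySem.List.pyRange_one_eq_nil (by simp)]
      simp [foldMin]

lemma idx_eq_index? (l : List Int) (x : Int) (hx : x ∈ l) :
    PySem.List.index? l x = some (idx l x).toNat := by
  induction l with
  | nil => cases hx
  | cons d t ih =>
      by_cases hd : d = x
      · subst hd; rw [PySem.List.index?_cons_self]; simp [idx]
      · have hxt : x ∈ t := by cases hx with | head => exact absurd rfl hd | tail _ h => exact h
        rw [PySem.List.index?_cons_of_ne t hd, ih hxt]
        simp only [idx, hd, if_false, Option.map_some]
        congr 1
        have := idx_nonneg t x
        omega

lemma A_eq_foldMin (numero : Int) :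
    obtener_menor numero =
      ((foldMin (digitsOf numero) (PySem.Int.mod numero 10) 0 0).1,
       (foldMin (digitsOf numero) (PySem.Int.mod numero 10) 0 0).2) := by
  obtain ⟨nf, hnf⟩ := loopA_eq numero (PySem.Int.mod numero 10) 0 0
  unfold obtener_menor cantidad_de_digitos
  rw [cantidad_loop_eq]
  simp only [zero_add] at hnf ⊢
  rw [hnf]

-- ===== VERDICT (by name: the statement is the Claim_ definition above) =====
theorem obtener_menor_spec : Claim_equal_obtener_menor := by
  intro numero _
  unfold Spec_obtener_menor
  rw [A_eq_foldMin]
  unfold obtener_menor_alt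
  rcases hD : digitsOf numero with _ | ⟨d0, t⟩
  · simp [foldMin]
  · have hpos : numero > 0 := by
      by_contra h; rw [digitsOf] at hD; simp [h] at hD
    have hd0 : d0 = PySem.Int.mod numero 10 := by
      rw [digitsOf, if_pos hpos] at hD
      injection hD with h1 h2; exact h1.symm
    rw [hd0] at hD ⊢
    set m0 := PySem.Int.mod numero 10 with hm0
    simp only [foldMin, lt_irrefl, ite_false]
    rw [foldMin_spec, PySem.List.min?_id_cons]
    set M := t.foldl min m0 with hM
    have hmem : M ∈ m0 :: t := by
      rcases PySem.List.foldl_min_mem t m0 with h | h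
      · rw [← hM] at h; rw [h]; exact List.mem_cons_self
      · exact List.mem_cons_of_mem _ h
    have hMle : M ≤ m0 := (PySem.List.foldl_min_le t m0).1
    simp only [Option.getD_some]
    rw [idx_eq_index? _ _ hmem]
    simp only [Option.getD_some]
    rcases lt_or_ge M m0 with hlt | hge
    · have hidx : idx (m0 :: t) M = 1 + idx t M := by
        simp only [idx]; rw [if_neg (by omega)]
      have hnn := idx_nonneg t M
      simp only [hlt, ite_true, Prod.mk.injEq]
      refine ⟨by trivial, ?_⟩
      rw [hidx]; push_cast; omega
    · have hMe : M = m0 := by omega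
      simp [hMe, idx]
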